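-- pv_equiv track=rewrite | github.com/SunakazeKun/pymsb | pymsb/helper.py | find_greater_prime
-- ===== SOURCE A (Python) =====
-- def find_greater_prime(val: int) -> int:
--     """
--     Calculates and returns the first prime number that is greater than the specified input value. This is loosely based
--     on the 6k+/-1 optimization algorithm for testing a number's primality.
--
--     :param val: the starting value.
--     :return: the first prime number that follows the input value.
--     """
--     # Standard cases
--     if val < 5:
--         if val < 2:   # Only even prime number
--             return 2
--         if val == 2:  # Needed due to "val % 3" below
--             return 3
--         return 5      # Needed due to "val % 5" below
--
--     # Start at next odd number
--     val = val + 2 if val & 1 else val + 1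
--
--     while True:
--         if val % 3 == 0 or val % 5 == 0:
--             val += 2  # Go to next odd number
--             continue
--
--         i = 5
--         prime = True
--         while i * i <= val and prime:
--             if val % i == 0 or val % (i + 2) == 0:
--                 prime = False
--             i += 6
--
--         if prime:
--             break
--         else:
--             val += 2  # Go to next odd number
--
--     return val
-- ===== SOURCE B (Python) =====
-- def find_greater_prime(val: int) -> int:
--     """Return the first prime strictly greater than val, by a segmented sieve:
--     sieve fixed-width windows above val, striking multiples of every d up to
--     the window top's square root, and return the first unstruck candidate."""
--     lo = max(val + 1, 2)
--     WIDTH = 256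
--     while True:
--         hi = lo + WIDTH
--         # integer square root of hi - 1 by incremental search
--         r = 1
--         while (r + 1) * (r + 1) < hi:
--             r += 1
--         flags = [True] * WIDTH
--         d = 2
--         while d <= r:
--             q = (lo + d - 1) // d  # first cofactor giving a multiple >= lo
--             if q < 2:
--                 q = 2              # never strike d itself
--             m = q * d
--             while m < hi:
--                 flags[m - lo] = False
--                 m += d
--             d += 1
--         for j in range(WIDTH):
--             if flags[j]:
--                 return lo + j
--         lo = hi
-- ===== Notes on version B (the rewrite author's own statement) =====
-- stated objective: alternative
-- what changed: Replaces A's per-candidate 6k±1 trial division with a segmented sieve: B sieves fixed-width windows above val, striking the multiples of every d up to the window top's square root, and returns the first unstruck candidate; no candidate is ever tested for divisibility individually.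
import Mathlib
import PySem

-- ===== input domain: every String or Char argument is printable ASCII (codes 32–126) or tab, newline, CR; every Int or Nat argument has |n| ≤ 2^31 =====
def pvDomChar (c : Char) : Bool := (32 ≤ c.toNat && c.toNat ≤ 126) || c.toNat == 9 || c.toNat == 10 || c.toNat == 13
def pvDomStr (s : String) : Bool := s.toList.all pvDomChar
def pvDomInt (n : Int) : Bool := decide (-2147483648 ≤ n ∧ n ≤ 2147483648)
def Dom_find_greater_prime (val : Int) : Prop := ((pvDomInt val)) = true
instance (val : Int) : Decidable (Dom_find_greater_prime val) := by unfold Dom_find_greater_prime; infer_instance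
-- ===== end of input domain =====

-- B replaces A's per-candidate 6k±1 trial division with a segmented sieve over fixed-width
-- windows above val (strike multiples of every d up to the window top's square root, return the
-- first unstruck candidate); objective: alternative algorithm, same return value everywhere.

-- ===== PORT A =====
-- small arithmetic facts (named, minimal hypotheses; cited by the ports' termination lemmas)
lemma pv_one_le (i : Int) (h : ¬ i ≤ 0) : 1 ≤ i := by omega
lemma pv_toNat_decr (n i s : Int) (hin : i ≤ n) (hs : 0 < s) :
    (n + s - (i + s)).toNat < (n + s - i).toNat := by omega
lemma pv_cast_pred (N : Nat) (h : N ≠ 0) : ((N - 1 : Nat) : Int) = (N : Int) - 1 := by omega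
lemma pv_shift2 (v : Int) (N : Nat) : v + 2 + 2 * ((N : Int) - 1) = v + 2 * (N : Int) := by omega
lemma pv_lt_of_le_pred (a N : Nat) (h0 : N ≠ 0) (h : a ≤ N - 1) : a < N := by omega
lemma pv_sub_even (a b : Int) (ha : a % 2 = 0) (hb : b % 2 = 0) : (a - b) % 2 = 0 := by omega
lemma pv_sub_odd (a b : Int) (ha : a % 2 = 1) (hb : b % 2 = 1) : (a - b) % 2 = 0 := by omega
lemma pv_odd_cast (p : Nat) (h : ¬ 2 ∣ p) : (p : Int) % 2 = 1 := by omega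
lemma pv_le_cast (v : Int) (p : Nat) (h : v.toNat ≤ p) : v ≤ (p : Int) := by omega
lemma pv_na_one (d : Int) (h2 : 2 ≤ d) (h : d.natAbs = 1) : False := by omega
lemma pv_na_self (d : Int) (p : Nat) (hlt : d < (p : Int)) (h : d.natAbs = p) (h2 : 2 ≤ d) :
    False := by omega
lemma pv_eq_one_abs (d : Int) (h1 : 1 ≤ d) (h : d.natAbs = 1) : d = 1 := by omega
lemma pv_abs_even (d : Int) (h : 2 ∣ d.natAbs) (ho : d % 2 = 1) : False := by omega
lemma pv_mod6_odd (d : Int) (h : d % 6 = 5) : d % 2 = 1 := by omega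
lemma pv_add2_mod6 (d : Int) (h : d % 6 = 5) : (d + 2) % 2 = 1 := by omega
lemma pv_step6_5 (x : Int) (h : x % 6 = 5) : (x + 6) % 6 = 5 := by omega
lemma pv_le_step6 (x : Int) : x ≤ x + 6 := by omega
lemma pv_ge5_step (x : Int) (h : 5 ≤ x) : 5 ≤ x + 6 := by omega
lemma pv_ge5_add2 (d : Int) (h : 5 ≤ d) : 5 ≤ d + 2 := by omega
lemma pv_ge2_of5 (d : Int) (h : 5 ≤ d) : 2 ≤ d := by omega
lemma pv_ge2_add2 (d : Int) (h : 5 ≤ d) : 2 ≤ d + 2 := by omega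
lemma pv_le_add2 (d : Int) : d ≤ d + 2 := by omega
lemma pv_lt_of_mul5 (d P : Int) (h5 : 5 ≤ d) (h : 5 * d ≤ P) : d + 2 < P := by omega
lemma pv_nonneg_half (k : Int) (h : 0 ≤ 2 * k) : 0 ≤ k := by omega
lemma pv_add_eq (v w k : Int) (h : w - v = 2 * k) : v + 2 * k = w := by omega
lemma pv_add_toNat (c : Int) (p : Nat) (h : c ≤ (p : Int)) :
    c + ((((p : Int) - c).toNat : Nat) : Int) = (p : Int) := by omega

-- the measure argument shared by A's trial-division loop
lemma pv_le_of_sq (n i : Int) (h : i * i ≤ n) : i ≤ n := by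
  by_cases h0 : i ≤ 0
  · exact le_trans h0 (le_trans (mul_self_nonneg i) h)
  · have h1 : (1:Int) ≤ i := pv_one_le i h0
    have h2 : 1 * i ≤ i * i := mul_le_mul_of_nonneg_right h1 (le_trans zero_le_one h1)
    rw [one_mul] at h2
    exact le_trans h2 h

lemma pv_step_dec (hi m d : Int) (hd : 0 < d) (hm : m < hi) :
    (hi - (m + d)).toNat < (hi - m).toNat := by omega

lemma pv_count_dec (r d : Int) (h : d ≤ r) :
    (r + 1 - (d + 1)).toNat < (r + 1 - d).toNat := by omega

lemma pv_isqrt_dec (hi r : Int) (h : (r + 1) * (r + 1) < hi) :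
    (hi - (r + 1)).toNat < (hi - r).toNat := by
  have : r < hi := by nlinarith [sq_nonneg (2 * r + 1)]
  omega

lemma pvDecrStep (n i s : Int) (hs : 0 < s) (h : i * i ≤ n) :
    (n + s - (i + s)).toNat < (n + s - i).toNat :=
  pv_toNat_decr n i s (pv_le_of_sq n i h) hs

-- A's inner 6k±1 trial loop: `while i*i <= val and prime: if val % i == 0 or val % (i+2) == 0 …; i += 6`
def aInner (v i : Int) : Bool :=
  if h : i * i ≤ v then
    if PySem.Int.mod v i == 0 || PySem.Int.mod v (i + 2) == 0 then false
    else aInner v (i + 6)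
  else true
termination_by (v + 6 - i).toNat
decreasing_by exact pvDecrStep v i 6 (by norm_num) h

-- the exit condition of A's outer `while True` loop (used only for the termination measure)
def stopA (v : Int) : Bool :=
  !(PySem.Int.mod v 3 == 0 || PySem.Int.mod v 5 == 0) && aInner v 5

-- `aInner v i` is true when no tested candidate divides v (tested i ≡ 5 [6], i+2)
lemma aInner_true_of (v : Int) : ∀ i : Int, 5 ≤ i → i % 6 = 5 →
    (∀ d : Int, i ≤ d → d % 6 = 5 → d * d ≤ v → ¬ d ∣ v ∧ ¬ (d + 2) ∣ v) →
    aInner v i = true := by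
  intro i
  induction i using aInner.induct (v := v) with
  | case1 x hx htest =>
      intro h5 h6 H
      exfalso
      rcases (H x le_rfl h6 hx) with ⟨hd1, hd2⟩
      simp only [Bool.or_eq_true, beq_iff_eq, PySem.Int.mod_eq_zero_iff_dvd] at htest
      rcases htest with h | h
      · exact hd1 h
      · exact hd2 h
  | case2 x hx htest ih =>
      intro h5 h6 H
      rw [aInner, dif_pos hx, if_neg htest]
      exact ih (pv_ge5_step x h5) (pv_step6_5 x h6)
        (fun d hd h6d hdd => H d (le_trans (pv_le_step6 x) hd) h6d hdd)
  | case3 x hx =>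
      intro _ _ _
      rw [aInner, dif_neg hx]

lemma stopA_of_parts (v : Int) (h3 : ¬ (3:Int) ∣ v) (h5 : ¬ (5:Int) ∣ v)
    (hInner : aInner v 5 = true) : stopA v = true := by
  have ha : (PySem.Int.mod v 3 == 0) = false := by
    rw [beq_eq_false_iff_ne, ne_eq, PySem.Int.mod_eq_zero_iff_dvd]
    exact h3
  have hb : (PySem.Int.mod v 5 == 0) = false := by
    rw [beq_eq_false_iff_ne, ne_eq, PySem.Int.mod_eq_zero_iff_dvd]
    exact h5
  unfold stopA
  rw [ha, hb, hInner]
  rfl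

lemma stopA_prime (p : Nat) (hp : p.Prime) (hge : 12 ≤ p) : stopA (p : Int) = true := by
  have hkey : ∀ d : Int, 2 ≤ d → d < (p : Int) → ¬ d ∣ (p : Int) := by
    intro d h2 hlt hdvd
    have hna : d.natAbs ∣ p := by
      have := Int.natAbs_dvd_natAbs.mpr hdvd
      simpa using this
    rcases hp.eq_one_or_self_of_dvd _ hna with h' | h'
    · exact pv_na_one d h2 h'
    · exact pv_na_self d p hlt h' h2
  have h12I : (12:Int) ≤ (p : Int) := by exact_mod_cast hge
  have h3 : ¬ (3:Int) ∣ (p : Int) :=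
    hkey 3 (by norm_num) (lt_of_lt_of_le (by norm_num) h12I)
  have h5 : ¬ (5:Int) ∣ (p : Int) :=
    hkey 5 (by norm_num) (lt_of_lt_of_le (by norm_num) h12I)
  have hInner : aInner (p : Int) 5 = true := by
    apply aInner_true_of _ 5 (by norm_num) (by norm_num)
    intro d hd h6 hdd
    have hd0 : (0:Int) ≤ d := le_trans (by norm_num) hd
    have hmul : 5 * d ≤ d * d := mul_le_mul_of_nonneg_right hd hd0
    have hd2p : d + 2 < (p : Int) := pv_lt_of_mul5 d _ hd (le_trans hmul hdd)
    have hdp : d < (p : Int) := lt_of_le_of_lt (pv_le_add2 d) hd2p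
    exact ⟨hkey d (pv_ge2_of5 d hd) hdp, hkey (d + 2) (pv_ge2_add2 d hd) hd2p⟩
  exact stopA_of_parts _ h3 h5 hInner

lemma stopA_two_pow (j : Nat) (h3j : 3 ≤ j) : stopA ((2:Int) ^ j) = true := by
  have hj0 : j ≠ 0 := by
    intro h
    rw [h] at h3j
    exact absurd h3j (by norm_num)
  have hone : ∀ d : Int, 1 ≤ d → d % 2 = 1 → d ∣ (2:Int) ^ j → d = 1 := by
    intro d h1 hodd hdvd
    have hna : d.natAbs ∣ 2 ^ j := by
      have := Int.natAbs_dvd_natAbs.mpr hdvd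
      simpa using this
    rcases (Nat.dvd_prime_pow Nat.prime_two).mp hna with ⟨k, hk, hdk⟩
    cases k with
    | zero =>
        rw [pow_zero] at hdk
        exact pv_eq_one_abs d h1 hdk
    | succ m =>
        exfalso
        exact pv_abs_even d (hdk ▸ dvd_pow_self 2 (Nat.succ_ne_zero m)) hodd
  have hn5 : ∀ d : Int, 5 ≤ d → d % 2 = 1 → ¬ d ∣ (2:Int) ^ j := by
    intro d h5 hodd hdvd
    have h1 := hone d (le_trans (by norm_num) h5) hodd hdvd
    rw [h1] at h5
    exact absurd h5 (by norm_num)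
  have h3 : ¬ (3:Int) ∣ (2:Int) ^ j := by
    intro hdvd
    have := hone 3 (by norm_num) (by norm_num) hdvd
    exact absurd this (by norm_num)
  have h5 : ¬ (5:Int) ∣ (2:Int) ^ j := hn5 5 (by norm_num) (by norm_num)
  have hInner : aInner ((2:Int) ^ j) 5 = true := by
    apply aInner_true_of _ 5 (by norm_num) (by norm_num)
    intro d hd h6 _
    exact ⟨hn5 d hd (pv_mod6_odd d h6), hn5 (d + 2) (pv_ge5_add2 d hd) (pv_add2_mod6 d h6)⟩
  exact stopA_of_parts _ h3 h5 hInner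

-- stepping by 2 from v reaches any w ≥ v of equal parity
lemma reach2 (v w : Int) (hle : v ≤ w) (hpar : (w - v) % 2 = 0) (hw : stopA w = true) :
    ∃ n : Nat, stopA (v + 2 * n) = true := by
  obtain ⟨k, hk⟩ := Int.dvd_of_emod_eq_zero hpar
  have hk0 : 0 ≤ k := pv_nonneg_half k (by rw [← hk]; exact sub_nonneg.mpr hle)
  refine ⟨k.toNat, ?_⟩
  rw [Int.toNat_of_nonneg hk0, pv_add_eq v w k hk]
  exact hw

-- A's outer loop terminates: some later candidate (in steps of 2) passes the test
lemma exA (v : Int) : ∃ n : Nat, stopA (v + 2 * n) = true := by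
  rcases Int.emod_two_eq v with hv | hv
  · -- v even: reach the power of two 2^(max v.toNat 3)
    have h3j : 3 ≤ max v.toNat 3 := le_max_right _ _
    have hj0 : max v.toNat 3 ≠ 0 := by
      intro h
      rw [h] at h3j
      exact absurd h3j (by norm_num)
    have hlt : v < (2:Int) ^ (max v.toNat 3) := by
      calc v ≤ (v.toNat : Int) := Int.self_le_toNat v
        _ < ((2 ^ v.toNat : Nat) : Int) := by exact_mod_cast Nat.lt_two_pow_self
        _ ≤ ((2 ^ (max v.toNat 3) : Nat) : Int) := by
            exact_mod_cast Nat.pow_le_pow_right (by norm_num) (le_max_left _ _)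
        _ = (2:Int) ^ (max v.toNat 3) := by
            rw [Nat.cast_pow]
            norm_num
    have he : ((2:Int) ^ (max v.toNat 3)) % 2 = 0 :=
      Int.emod_eq_zero_of_dvd (dvd_pow_self 2 hj0)
    exact reach2 v ((2:Int) ^ (max v.toNat 3)) (le_of_lt hlt) (pv_sub_even _ v he hv)
      (stopA_two_pow _ h3j)
  · -- v odd: reach a prime p ≥ max (v.toNat + 1) 12 (odd, since it is ≥ 12)
    obtain ⟨p, hpge, hp⟩ := Nat.exists_infinite_primes (max (v.toNat + 1) 12)
    have h12 : 12 ≤ p := le_trans (le_max_right _ _) hpge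
    have hgev : v ≤ (p : Int) :=
      pv_le_cast v p (Nat.le_of_succ_le (le_trans (le_max_left _ _) hpge))
    have hpodd : ¬ 2 ∣ p := by
      intro h
      rcases hp.eq_one_or_self_of_dvd 2 h with h' | h'
      · exact absurd h' (by norm_num)
      · rw [← h'] at h12
        exact absurd h12 (by norm_num)
    exact reach2 v p hgev (pv_sub_odd _ v (pv_odd_cast p hpodd) hv) (stopA_prime p hp h12)

lemma exA_shift (v : Int) (h : stopA v = false) :
    Nat.find (exA (v + 2)) < Nat.find (exA v) := by
  have hN := Nat.find_spec (exA v)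
  have hN0 : Nat.find (exA v) ≠ 0 := by
    intro h0
    rw [h0] at hN
    norm_num at hN
    simp [hN] at h
  have hw : stopA ((v + 2) + 2 * ((Nat.find (exA v) - 1 : Nat) : Int)) = true := by
    rw [pv_cast_pred _ hN0, pv_shift2 v _]
    exact hN
  exact pv_lt_of_le_pred _ _ hN0 (Nat.find_min' (exA (v + 2)) hw)

lemma stopA_false1 (v : Int) (h1 : (PySem.Int.mod v 3 == 0 || PySem.Int.mod v 5 == 0) = true) :
    stopA v = false := by
  simp only [stopA, h1, Bool.not_true, Bool.false_and]

lemma stopA_false2 (v : Int) (h2 : ¬ aInner v 5 = true) : stopA v = false := by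
  simp only [Bool.not_eq_true] at h2
  simp only [stopA, h2, Bool.and_false]

-- A's outer `while True` loop
def aLoop (v : Int) : Int :=
  if h1 : PySem.Int.mod v 3 == 0 || PySem.Int.mod v 5 == 0 then aLoop (v + 2)
  else if h2 : aInner v 5 then v
  else aLoop (v + 2)
termination_by Nat.find (exA v)
decreasing_by
  · exact exA_shift v (stopA_false1 v h1)
  · exact exA_shift v (stopA_false2 v h2)

def find_greater_prime (val : Int) : Int :=
  if val < 5 then
    if val < 2 then 2
    else if val == 2 then 3
    else 5
  else
    -- `val + 2 if val & 1 else val + 1`: `val & 1` nonzero iff val % 2 == 1 (exact for all ints)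
    aLoop (if PySem.Int.mod val 2 == 1 then val + 2 else val + 1)

-- ===== PORT B =====
-- primality over Int (proof-side notion shared by both characterizations)
def Pr (p : Int) : Prop := 2 ≤ p ∧ p.toNat.Prime

-- Boolean form, for the termination measure of B's window loop
def prB (p : Int) : Bool := decide (2 ≤ p ∧ p.toNat.Prime)

lemma prB_iff (p : Int) : prB p = true ↔ Pr p := by
  simp [prB, Pr]

lemma not_prime_of_divisor (q d : Int) (h2 : 2 ≤ d) (hlt : d < q) (hdvd : d ∣ q) :
    ¬ Pr q := by
  rintro ⟨hq2, hqp⟩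
  have hd : d.natAbs ∣ q.natAbs := Int.natAbs_dvd_natAbs.mpr hdvd
  have hqn : q.toNat = q.natAbs := by omega
  rcases hqp.eq_one_or_self_of_dvd d.natAbs (by rw [hqn]; exact hd) with h' | h' <;> omega

-- B's innermost loop: `while m < hi: flags[m - lo] = False; m += d`  (the 0 < d guard only makes
-- the recursion total; every call site has d ≥ 2)
def markMult (lo hi d m : Int) (flags : List Bool) : List Bool :=
  if h : 0 < d ∧ m < hi then
    markMult lo hi d (m + d) (flags.set (m - lo).toNat false)
  else flags
termination_by (hi - m).toNat
decreasing_by exact pv_step_dec hi m d h.1 h.2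

lemma markMult_len (lo hi d : Int) : ∀ (m : Int) (flags : List Bool),
    (markMult lo hi d m flags).length = flags.length := by
  intro m flags
  induction m, flags using markMult.induct (lo := lo) (hi := hi) (d := d) with
  | case1 m flags h ih =>
      rw [markMult, dif_pos h]
      rw [ih, List.length_set]
  | case2 m flags h =>
      rw [markMult, dif_neg h]

-- 'index j will (still) get struck by the loop starting at m'
def HitFrom (lo hi d m : Int) (j : Nat) : Prop :=
  ∃ k : Nat, lo + (j : Int) = m + d * (k : Int) ∧ lo + (j : Int) < hi

lemma markMult_miss (lo hi d : Int) : ∀ (m : Int) (flags : List Bool) (j : Nat), lo ≤ m →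
    ¬ HitFrom lo hi d m j → (markMult lo hi d m flags)[j]? = flags[j]? := by
  intro m flags
  induction m, flags using markMult.induct (lo := lo) (hi := hi) (d := d) with
  | case1 m flags h ih =>
      intro j hm hnh
      rw [markMult, dif_pos h]
      have hne : (m - lo).toNat ≠ j := by
        intro he
        exact hnh ⟨0, by push_cast; omega⟩
      have hnh' : ¬ HitFrom lo hi d (m + d) j := by
        rintro ⟨k, hk1, hk2⟩
        refine hnh ⟨k + 1, ?_, hk2⟩
        have hr : d * ((k : Int) + 1) = d * (k : Int) + d := by ring
        push_cast
        linarith [hk1, hr]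
      rw [ih j (by omega) hnh']
      exact List.getElem?_set_ne hne
  | case2 m flags h =>
      intro j _ _
      rw [markMult, dif_neg h]

-- `q = (lo+d-1)//d; if q < 2: q = 2` — the starting cofactor of the inner loop
def startQ (lo d : Int) : Int :=
  if PySem.Int.floordiv (lo + d - 1) d < 2 then 2 else PySem.Int.floordiv (lo + d - 1) d

-- B's divisor loop: `while d <= r: q = (lo+d-1)//d; if q < 2: q = 2; m = q*d; <inner>; d += 1`
def markAll (lo hi r d : Int) (flags : List Bool) : List Bool :=
  if h : d ≤ r then
    markAll lo hi r (d + 1) (markMult lo hi d (startQ lo d * d) flags)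
  else flags
termination_by (r + 1 - d).toNat
decreasing_by exact pv_count_dec r d h

lemma markAll_len (lo hi r : Int) : ∀ (d : Int) (flags : List Bool),
    (markAll lo hi r d flags).length = flags.length := by
  intro d flags
  induction d, flags using markAll.induct (lo := lo) (hi := hi) (r := r) with
  | case1 d flags h ih =>
      rw [markAll, dif_pos h]
      rw [ih, markMult_len]
  | case2 d flags h =>
      rw [markAll, dif_neg h]

-- the start value q*d of the inner loop: first multiple of d that is ≥ lo and has cofactor ≥ 2
lemma start_facts (lo d : Int) (hd : 0 < d) :
    lo ≤ startQ lo d * d ∧ 2 ≤ startQ lo d ∧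
    ∀ c : Int, 2 ≤ c → lo ≤ c * d → startQ lo d ≤ c := by
  unfold startQ
  have hb := (PySem.Int.floordiv_eq_iff_of_pos (a := lo + d - 1) (b := d)
    (q := PySem.Int.floordiv (lo + d - 1) d) hd).mp rfl
  obtain ⟨hb1, hb2⟩ := hb
  set q0 := PySem.Int.floordiv (lo + d - 1) d with hq0
  have hexp : (q0 + 1) * d = q0 * d + d := by ring
  rw [hexp] at hb2
  split_ifs with hlt
  · -- q = 2
    refine ⟨?_, le_rfl, fun c hc _ => hc⟩
    -- lo + d - 1 < q0*d + d ≤ 2*d (q0 ≤ 1) hence lo ≤ d ≤ 2*d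
    have hq1 : q0 ≤ 1 := by omega
    have h1 : q0 * d ≤ 1 * d := mul_le_mul_of_nonneg_right hq1 (by omega)
    have h2 : (1:Int) * d ≤ 2 * d := mul_le_mul_of_nonneg_right (by norm_num) (by omega)
    nlinarith
  · -- q = q0 ≥ 2
    refine ⟨by omega, by omega, ?_⟩
    intro c hc hcd
    by_contra hcq
    have hcq' : c ≤ q0 - 1 := by omega
    have h1 : c * d ≤ (q0 - 1) * d := mul_le_mul_of_nonneg_right hcq' (by omega)
    have h2 : (q0 - 1) * d = q0 * d - d := by ring
    omega

-- 'candidate lo+j has a divisor d in [2, r] with cofactor ≥ 2' — what the whole sieve strikes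
def Marked (lo r : Int) (j : Nat) : Prop :=
  ∃ d : Int, 2 ≤ d ∧ d ≤ r ∧ ∃ c : Int, 2 ≤ c ∧ lo + (j : Int) = c * d

lemma markAll_miss (lo hi r : Int) : ∀ (d : Int) (flags : List Bool) (j : Nat), 2 ≤ d →
    (∀ d' : Int, d ≤ d' → d' ≤ r → ¬ ∃ c : Int, 2 ≤ c ∧ lo + (j : Int) = c * d') →
    (markAll lo hi r d flags)[j]? = flags[j]? := by
  intro d flags
  induction d, flags using markAll.induct (lo := lo) (hi := hi) (r := r) with
  | case1 d flags h ih =>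
      intro j hd2 hnone
      rw [markAll, dif_pos h]
      obtain ⟨hge, hq2, _⟩ := start_facts lo d (by omega)
      have hnh : ¬ HitFrom lo hi d (startQ lo d * d) j := by
        rintro ⟨k, hk1, _⟩
        refine hnone d le_rfl h ⟨startQ lo d + k, by omega, ?_⟩
        have : (startQ lo d + (k : Int)) * d = startQ lo d * d + d * (k : Int) := by ring
        omega
      rw [ih j (by omega) (fun d' hd' hr' => hnone d' (by omega) hr')]
      exact markMult_miss lo hi d _ flags j hge hnh
  | case2 d flags h =>
      intro j _ _
      rw [markAll, dif_neg h]

lemma marked_not_Pr (lo r : Int) (j : Nat) (h : Marked lo r j) : ¬ Pr (lo + (j : Int)) := by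
  obtain ⟨d, hd2, _, c, hc2, hceq⟩ := h
  have hdc : d < lo + (j : Int) := by
    have h1 : 2 * d ≤ c * d := mul_le_mul_of_nonneg_right hc2 (by omega)
    linarith [h1, hceq]
  exact not_prime_of_divisor _ d hd2 hdc ⟨c, by rw [hceq]; ring⟩

-- B's incremental integer-square-root loop: `r = 1; while (r+1)*(r+1) < hi: r += 1`
def isqrtLoop (hi r : Int) : Int :=
  if h : (r + 1) * (r + 1) < hi then isqrtLoop hi (r + 1) else r
termination_by (hi - r).toNat
decreasing_by exact pv_isqrt_dec hi r h

-- B's final scan: `for j in range(WIDTH): if flags[j]: return lo + j`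
def firstTrue (flags : List Bool) (j : Int) : Option Int :=
  match flags with
  | [] => none
  | b :: rest => if b then some j else firstTrue rest (j + 1)

lemma firstTrue_none_all : ∀ (flags : List Bool) (j : Int), firstTrue flags j = none →
    ∀ i : Nat, flags[i]? ≠ some true := by
  intro flags
  induction flags with
  | nil =>
      intro j _ i
      simp
  | cons b rest ih =>
      intro j h i
      rw [firstTrue] at h
      by_cases hb : b = true
      · rw [if_pos hb] at h
        exact absurd h (by simp)
      · rw [if_neg hb] at h
        cases i with
        | zero => simp [Bool.not_eq_true] at hb ⊢; simp [hb]
        | succ i' => simpa using ih (j + 1) h i'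

-- window length is 256 (needed for the termination argument and the spec)
lemma window_len (lo : Int) :
    (markAll lo (lo + 256) (isqrtLoop (lo + 256) 1) 2 (List.replicate 256 true)).length = 256 := by
  rw [markAll_len, List.length_replicate]

-- a struck entry is composite (for any lo)
lemma window_false (lo : Int) (j : Nat) (hj : j < 256)
    (h : (markAll lo (lo + 256) (isqrtLoop (lo + 256) 1) 2 (List.replicate 256 true))[j]? =
      some false) : ¬ Pr (lo + (j : Int)) := by
  by_cases hm : Marked lo (isqrtLoop (lo + 256) 1) j
  · exact marked_not_Pr lo _ j hm
  · exfalso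
    rw [markAll_miss lo (lo + 256) (isqrtLoop (lo + 256) 1) 2 _ j le_rfl
      (by
        intro d' hd' hr' hc
        exact hm ⟨d', hd', hr', hc⟩)] at h
    rw [List.getElem?_replicate, if_pos hj] at h
    exact absurd h (by simp)

-- if the scan found nothing, every candidate in the window is composite
lemma windowNone (lo : Int)
    (h : firstTrue (markAll lo (lo + 256) (isqrtLoop (lo + 256) 1) 2 (List.replicate 256 true)) 0 =
      none) : ∀ n : Nat, n < 256 → ¬ Pr (lo + (n : Int)) := by
  intro n hn
  have hlen := window_len lo
  have hsome : ∃ b, (markAll lo (lo + 256) (isqrtLoop (lo + 256) 1) 2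
      (List.replicate 256 true))[n]? = some b := by
    rw [List.getElem?_eq_getElem (by omega)]
    exact ⟨_, rfl⟩
  obtain ⟨b, hb⟩ := hsome
  cases b with
  | false => exact window_false lo n hn hb
  | true => exact absurd hb (firstTrue_none_all _ 0 h n)

-- B's window loop terminates: primes exist above any bound
lemma exP (lo : Int) : ∃ n : Nat, prB (lo + (n : Int)) = true := by
  obtain ⟨p, hpge, hp⟩ := Nat.exists_infinite_primes (max lo.toNat 2)
  refine ⟨((p : Int) - lo).toNat, ?_⟩
  have h1 : lo ≤ (p : Int) := pv_le_cast lo p (le_trans (le_max_left _ _) hpge)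
  rw [pv_add_toNat lo p h1, prB_iff]
  refine ⟨by exact_mod_cast le_trans (le_max_right _ _) hpge, ?_⟩
  simpa using hp

lemma outer_dec (lo : Int)
    (h : firstTrue (markAll lo (lo + 256) (isqrtLoop (lo + 256) 1) 2 (List.replicate 256 true)) 0 =
      none) : Nat.find (exP (lo + 256)) < Nat.find (exP lo) := by
  have hN := Nat.find_spec (exP lo)
  rw [prB_iff] at hN
  have hN256 : 256 ≤ Nat.find (exP lo) := by
    by_contra hlt
    exact windowNone lo h (Nat.find (exP lo)) (by omega) hN
  have hw : prB ((lo + 256) + ((Nat.find (exP lo) - 256 : Nat) : Int)) = true := by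
    rw [prB_iff]
    have hcast : ((Nat.find (exP lo) - 256 : Nat) : Int) = (Nat.find (exP lo) : Int) - 256 := by
      omega
    rw [hcast]
    have : lo + 256 + ((Nat.find (exP lo) : Int) - 256) = lo + (Nat.find (exP lo) : Int) := by ring
    rw [this]
    exact hN
  have := Nat.find_min' (exP (lo + 256)) hw
  omega

-- B's outer `while True` loop over windows [lo, lo+256)
def outer (lo : Int) : Int :=
  match h : firstTrue (markAll lo (lo + 256) (isqrtLoop (lo + 256) 1) 2 (List.replicate 256 true))
      0 with
  | some j => lo + j
  | none => outer (lo + 256)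
termination_by Nat.find (exP lo)
decreasing_by exact outer_dec lo h

def find_greater_prime_alt (val : Int) : Int :=
  outer (max (val + 1) 2)

-- ===== PRECONDITION & SPEC =====
def Spec_find_greater_prime (val : Int) (out : Int) : Prop := out = find_greater_prime_alt val
instance (val : Int) (out : Int) : Decidable (Spec_find_greater_prime val out) := by unfold Spec_find_greater_prime; infer_instance

-- ===== CLAIM (what is proved, stated in full; the proofs are below) =====
def Claim_equal_find_greater_prime : Prop := ∀ (val : Int), Dom_find_greater_prime val → Spec_find_greater_prime val (find_greater_prime val)

-- ===== LEMMAS AND PROOFS =====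

lemma markMult_hit (lo hi d : Int) (hd : 0 < d) : ∀ (m : Int) (flags : List Bool) (j : Nat), lo ≤ m →
    j < flags.length → HitFrom lo hi d m j → (markMult lo hi d m flags)[j]? = some false := by
  intro m flags
  induction m, flags using markMult.induct (lo := lo) (hi := hi) (d := d) with
  | case1 m flags h ih =>
      intro j hm hlen hit
      obtain ⟨k, hk1, hk2⟩ := hit
      rw [markMult, dif_pos h]
      cases k with
      | zero =>
          have hj : (m - lo).toNat = j := by push_cast at hk1; omega
          by_cases hh : HitFrom lo hi d (m + d) j
          · exact ih j (by omega) (by rw [List.length_set]; exact hlen) hh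
          · rw [markMult_miss lo hi d (m + d) _ j (by omega) hh]
            subst hj
            exact List.getElem?_set_self (by omega)
      | succ k' =>
          have hh : HitFrom lo hi d (m + d) j := by
            refine ⟨k', ?_, hk2⟩
            have hr : d * ((k' : Int) + 1) = d * (k' : Int) + d := by ring
            push_cast at hk1 ⊢
            linarith [hk1, hr]
          exact ih j (by omega) (by rw [List.length_set]; exact hlen) hh
  | case2 m flags h =>
      intro j hm hlen hit
      obtain ⟨k, hk1, hk2⟩ := hit
      exfalso
      have hdk : 0 ≤ d * (k : Int) := mul_nonneg (by omega) (Int.natCast_nonneg k)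
      omega

lemma hit_iff (lo hi d : Int) (hd : 2 ≤ d) (j : Nat) (hjhi : lo + (j : Int) < hi) :
    HitFrom lo hi d (startQ lo d * d) j ↔ ∃ c : Int, 2 ≤ c ∧ lo + (j : Int) = c * d := by
  obtain ⟨hge, hq2, hmin⟩ := start_facts lo d (by omega)
  set q := startQ lo d
  constructor
  · rintro ⟨k, hk1, _⟩
    refine ⟨q + k, by omega, ?_⟩
    have heq : (q + (k : Int)) * d = q * d + d * (k : Int) := by ring
    linarith [hk1, heq]
  · rintro ⟨c, hc2, hceq⟩
    have hlo : lo ≤ c * d := by omega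
    have hqc : q ≤ c := hmin c hc2 hlo
    refine ⟨(c - q).toNat, ?_, hjhi⟩
    have hcast : (((c - q).toNat : Nat) : Int) = c - q := by omega
    rw [hcast]
    have heq : q * d + d * (c - q) = c * d := by ring
    linarith [hceq, heq]

lemma markAll_hit (lo hi r : Int) : ∀ (d : Int) (flags : List Bool) (j : Nat), 2 ≤ d →
    lo + (j : Int) < hi → j < flags.length →
    (∃ d' : Int, d ≤ d' ∧ d' ≤ r ∧ ∃ c : Int, 2 ≤ c ∧ lo + (j : Int) = c * d') →
    (markAll lo hi r d flags)[j]? = some false := by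
  intro d flags
  induction d, flags using markAll.induct (lo := lo) (hi := hi) (r := r) with
  | case1 d flags h ih =>
      intro j hd2 hjhi hlen hw
      rw [markAll, dif_pos h]
      by_cases hrest : ∃ d'' : Int, d + 1 ≤ d'' ∧ d'' ≤ r ∧ ∃ c : Int, 2 ≤ c ∧ lo + (j : Int) = c * d''
      · exact ih j (by omega) hjhi (by rw [markMult_len]; exact hlen) hrest
      · obtain ⟨d', hdd', hd'r, hc⟩ := hw
        have hd'd : d' = d := by
          by_contra hne
          exact hrest ⟨d', by omega, hd'r, hc⟩
        have hc' : ∃ c : Int, 2 ≤ c ∧ lo + (j : Int) = c * d := hd'd ▸ hc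
        rw [markAll_miss lo hi r (d + 1) _ j (by omega)
          (fun d'' h1 h2 hc'' => hrest ⟨d'', h1, h2, hc''⟩)]
        obtain ⟨hge, _, _⟩ := start_facts lo d (by omega)
        exact markMult_hit lo hi d (by omega) _ flags j hge hlen
          ((hit_iff lo hi d hd2 j hjhi).mpr hc')
  | case2 d flags h =>
      intro j _ _ _ hw
      obtain ⟨d', hdd', hd'r, _⟩ := hw
      omega

lemma isqrt_pos (hi : Int) : ∀ r : Int, r ≤ isqrtLoop hi r := by
  intro r
  induction r using isqrtLoop.induct (hi := hi) with
  | case1 r h ih =>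
      rw [isqrtLoop, dif_pos h]
      omega
  | case2 r h =>
      rw [isqrtLoop, dif_neg h]

lemma isqrt_ge (hi : Int) : ∀ r : Int,
    hi ≤ (isqrtLoop hi r + 1) * (isqrtLoop hi r + 1) := by
  intro r
  induction r using isqrtLoop.induct (hi := hi) with
  | case1 r h ih =>
      rw [isqrtLoop, dif_pos h]
      exact ih
  | case2 r h =>
      rw [isqrtLoop, dif_neg h]
      omega

lemma firstTrue_some_spec : ∀ (flags : List Bool) (j out : Int), firstTrue flags j = some out →
    ∃ i : Nat, out = j + (i : Int) ∧ flags[i]? = some true ∧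
      ∀ i' : Nat, i' < i → flags[i']? = some false := by
  intro flags
  induction flags with
  | nil =>
      intro j out h
      exact absurd h (by simp [firstTrue])
  | cons b rest ih =>
      intro j out h
      rw [firstTrue] at h
      by_cases hb : b = true
      · rw [if_pos hb] at h
        refine ⟨0, by simpa using h.symm, by simp [hb], ?_⟩
        intro i' hi'
        omega
      · rw [if_neg hb] at h
        obtain ⟨i, hout, htrue, hmin⟩ := ih (j + 1) out h
        refine ⟨i + 1, by push_cast; omega, by simpa using htrue, ?_⟩
        intro i' hi'
        cases i' with
        | zero => simp [Bool.not_eq_true] at hb ⊢; simp [hb]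
        | succ i'' => simpa using hmin i'' (by omega)

lemma even_not_Pr (q : Int) (h2 : 2 < q) (he : q % 2 = 0) : ¬ Pr q :=
  not_prime_of_divisor q 2 le_rfl h2 (by omega)

-- an unstruck entry is prime (needs lo ≥ 2, so every candidate is ≥ 2)
lemma window_true (lo : Int) (h2 : 2 ≤ lo) (j : Nat) (hj : j < 256)
    (h : (markAll lo (lo + 256) (isqrtLoop (lo + 256) 1) 2 (List.replicate 256 true))[j]? =
      some true) : Pr (lo + (j : Int)) := by
  have hr1 : (1:Int) ≤ isqrtLoop (lo + 256) 1 := isqrt_pos (lo + 256) 1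
  have hsq : lo + 256 ≤ (isqrtLoop (lo + 256) 1 + 1) * (isqrtLoop (lo + 256) 1 + 1) :=
    isqrt_ge (lo + 256) 1
  by_contra hnp
  -- composite: its least factor d satisfies d² ≤ lo+j < (r+1)², so d ≤ r: it was struck
  have hc2 : 2 ≤ lo + (j : Int) := by omega
  have hcn2 : 2 ≤ (lo + (j : Int)).toNat := by omega
  have hnpn : ¬ (lo + (j : Int)).toNat.Prime := fun hp => hnp ⟨hc2, hp⟩
  set c := (lo + (j : Int)).toNat with hcdef
  have hmp : c.minFac.Prime := Nat.minFac_prime (by omega)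
  have hmdvd : c.minFac ∣ c := Nat.minFac_dvd c
  have hm2 : 2 ≤ c.minFac := hmp.two_le
  have hsqle : c.minFac * c.minFac ≤ c := by
    have := Nat.minFac_sq_le_self (by omega : 0 < c) hnpn
    simpa [pow_two] using this
  obtain ⟨k, hk⟩ := hmdvd
  have hk2 : 2 ≤ k := by
    rcases Nat.lt_or_ge k 2 with hlt | hge
    · exfalso
      interval_cases k
      · rw [Nat.mul_zero] at hk
        omega
      · rw [Nat.mul_one] at hk
        rw [← hk] at hmp
        exact hnpn hmp
    · exact hge
  have hcI : ((c : Nat) : Int) = lo + (j : Int) := by omega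
  have hmr : (c.minFac : Int) ≤ isqrtLoop (lo + 256) 1 := by
    by_contra hgt
    have h1 : (isqrtLoop (lo + 256) 1 + 1) ≤ (c.minFac : Int) :=
      Int.add_one_le_iff.mpr (lt_of_not_ge hgt)
    have h2' : (isqrtLoop (lo + 256) 1 + 1) * (isqrtLoop (lo + 256) 1 + 1) ≤
        (c.minFac : Int) * (c.minFac : Int) :=
      mul_le_mul h1 h1 (by omega) (by omega)
    have h3 : ((c.minFac * c.minFac : Nat) : Int) ≤ ((c : Nat) : Int) := by exact_mod_cast hsqle
    push_cast at h3
    linarith [hsq, h2', h3, hcI]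
  have hmark : Marked lo (isqrtLoop (lo + 256) 1) j := by
    refine ⟨(c.minFac : Int), by exact_mod_cast hm2, hmr, (k : Int), by exact_mod_cast hk2, ?_⟩
    have hkI : ((c : Nat) : Int) = (k : Int) * (c.minFac : Int) := by
      exact_mod_cast congrArg (Nat.cast (R := Int)) (hk.trans (Nat.mul_comm _ _))
    rw [← hcI]
    exact hkI
  have := markAll_hit lo (lo + 256) (isqrtLoop (lo + 256) 1) 2 (List.replicate 256 true) j
    le_rfl (by omega) (by rw [List.length_replicate]; exact hj)
    (by obtain ⟨d, hd1, hd2, hc'⟩ := hmark; exact ⟨d, hd1, hd2, hc'⟩)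
  rw [this] at h
  exact absurd h (by simp)

lemma outer_eq_some (lo j : Int)
    (h : firstTrue (markAll lo (lo + 256) (isqrtLoop (lo + 256) 1) 2 (List.replicate 256 true)) 0 =
      some j) : outer lo = lo + j := by
  rw [outer, h]

lemma outer_eq_none (lo : Int)
    (h : firstTrue (markAll lo (lo + 256) (isqrtLoop (lo + 256) 1) 2 (List.replicate 256 true)) 0 =
      none) : outer lo = outer (lo + 256) := by
  rw [outer, h]

-- outer returns the least prime ≥ lo
lemma outer_spec : ∀ lo : Int, 2 ≤ lo →
    Pr (outer lo) ∧ lo ≤ outer lo ∧ ∀ q, lo ≤ q → q < outer lo → ¬ Pr q := by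
  intro lo
  induction lo using outer.induct with
  | case1 lo j h =>
      intro h2
      rw [outer_eq_some lo j h]
      obtain ⟨i, hout, htrue, hmin⟩ := firstTrue_some_spec _ 0 j h
      have hi256 : i < 256 := by
        have := List.getElem?_eq_some_iff.mp htrue
        obtain ⟨hlt, _⟩ := this
        rwa [window_len lo] at hlt
      have hji : j = (i : Int) := by omega
      subst hji
      refine ⟨window_true lo h2 i hi256 htrue, by omega, ?_⟩
      intro q hq1 hq2
      have hqi : q = lo + (((q - lo).toNat : Nat) : Int) := by omega
      rw [hqi]
      have hlt : (q - lo).toNat < i := by omega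
      exact window_false lo _ (by omega) (hmin _ hlt)
  | case2 lo h ih =>
      intro h2
      rw [outer_eq_none lo h]
      obtain ⟨hp, hge, hmin⟩ := ih (by omega)
      refine ⟨hp, by omega, ?_⟩
      intro q hq1 hq2
      by_cases hq : q < lo + 256
      · have hqi : q = lo + (((q - lo).toNat : Nat) : Int) := by omega
        rw [hqi]
        exact windowNone lo h _ (by omega)
      · exact hmin q (by omega) hq2

-- A-side characterization (trial division soundness for A's loops)
lemma aInner_true_sound (v : Int) : ∀ i : Int, aInner v i = true → 5 ≤ i → i % 6 = 5 →
    ∀ d : Int, i ≤ d → (d % 6 = 5 ∨ d % 6 = 1) → d * d ≤ v → ¬ d ∣ v := by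
  intro i
  induction i using aInner.induct (v := v) with
  | case1 x hx htest =>
      intro h
      rw [aInner, dif_pos hx, if_pos htest] at h
      exact absurd h (by simp)
  | case2 x hx htest ih =>
      intro h h5 h6 d hd hdm hdd
      rw [aInner, dif_pos hx, if_neg htest] at h
      simp only [Bool.or_eq_true, beq_iff_eq, PySem.Int.mod_eq_zero_iff_dvd, not_or] at htest
      by_cases hcase : x + 6 ≤ d
      · exact ih h (by omega) (by omega) d hcase hdm hdd
      · have : d = x ∨ d = x + 2 := by omega
        rcases this with h' | h' <;> subst h'
        · exact htest.1
        · exact htest.2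
  | case3 x hx =>
      intro h h5 h6 d hd hdm hdd
      have : x * x ≤ d * d := mul_le_mul hd hd (by omega) (by omega)
      omega

lemma aInner_false_sound (v : Int) : ∀ i : Int, aInner v i = false → 5 ≤ i →
    ∃ d : Int, i ≤ d ∧ d * d ≤ v ∧ (d ∣ v ∨ (d + 2) ∣ v) := by
  intro i
  induction i using aInner.induct (v := v) with
  | case1 x hx htest =>
      intro _ _
      refine ⟨x, le_rfl, hx, ?_⟩
      simpa only [Bool.or_eq_true, beq_iff_eq, PySem.Int.mod_eq_zero_iff_dvd] using htest
  | case2 x hx htest ih =>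
      intro h h5
      rw [aInner, dif_pos hx, if_neg htest] at h
      obtain ⟨d, hd1, hd2, hd3⟩ := ih h (by omega)
      exact ⟨d, by omega, hd2, hd3⟩
  | case3 x hx =>
      intro h _
      rw [aInner, dif_neg hx] at h
      exact absurd h (by simp)

lemma stopA_iff (v : Int) (h7 : 7 ≤ v) (hodd : v % 2 = 1) : stopA v = true ↔ Pr v := by
  unfold stopA
  constructor
  · intro h
    simp only [Bool.and_eq_true, Bool.not_eq_true', Bool.or_eq_false_iff, beq_eq_false_iff_ne,
      ne_eq, PySem.Int.mod_eq_zero_iff_dvd] at h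
    obtain ⟨⟨h3, h5⟩, hInner⟩ := h
    refine ⟨by omega, ?_⟩
    by_contra hnp
    have hpos : 0 < v.toNat := by omega
    have hsq := Nat.minFac_sq_le_self hpos hnp
    have hmp : (v.toNat).minFac.Prime := Nat.minFac_prime (by omega)
    have hmdvd : (v.toNat).minFac ∣ v.toNat := Nat.minFac_dvd _
    have hdvdI : ((v.toNat).minFac : Int) ∣ v := by
      have := Int.natCast_dvd_natCast.mpr hmdvd
      have hn : ((v.toNat : Nat) : Int) = v := by omega
      rwa [hn] at this
    have hm2 : ¬ 2 ∣ (v.toNat).minFac := by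
      intro h
      rcases hmp.eq_one_or_self_of_dvd 2 h with h' | h'
      · omega
      · rw [← h'] at hdvdI
        have : (2:Int) ∣ v := by exact_mod_cast hdvdI
        omega
    have hm3 : ¬ 3 ∣ (v.toNat).minFac := by
      intro h
      rcases hmp.eq_one_or_self_of_dvd 3 h with h' | h'
      · omega
      · rw [← h'] at hdvdI
        exact h3 (by exact_mod_cast hdvdI)
    have hm6 : ((v.toNat).minFac : Int) % 6 = 5 ∨ ((v.toNat).minFac : Int) % 6 = 1 := by
      have h2 := hmp.two_le
      omega
    have hm5 : 5 ≤ ((v.toNat).minFac : Int) := by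
      have h2 := hmp.two_le
      have h4 : (v.toNat).minFac ≠ 4 := by
        intro h
        rw [h] at hm2
        omega
      omega
    have hsq' : (((v.toNat).minFac : Int)) * ((v.toNat).minFac : Int) ≤ v := by
      have h1 : (v.toNat).minFac * (v.toNat).minFac ≤ v.toNat := by
        simpa [pow_two] using hsq
      have h2 : (((v.toNat).minFac * (v.toNat).minFac : Nat) : Int) ≤ ((v.toNat : Nat) : Int) := by
        exact_mod_cast h1
      push_cast at h2
      omega
    exact aInner_true_sound v 5 hInner (by norm_num) (by norm_num)
      ((v.toNat).minFac : Int) hm5 hm6 hsq' hdvdI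
  · intro hPr
    have h3 : ¬ (3:Int) ∣ v := by
      intro h
      exact not_prime_of_divisor v 3 (by norm_num) (by omega) h hPr
    have h5 : ¬ (5:Int) ∣ v := by
      intro h
      exact not_prime_of_divisor v 5 (by norm_num) (by omega) h hPr
    have hInner : aInner v 5 = true := by
      by_contra hb
      have hb' : aInner v 5 = false := by simpa using hb
      obtain ⟨d, hd5, hdd, hddvd⟩ := aInner_false_sound v 5 hb' (by norm_num)
      have hmul : 5 * d ≤ d * d := by nlinarith
      rcases hddvd with h' | h'
      · exact not_prime_of_divisor v d (by omega) (by linarith) h' hPr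
      · exact not_prime_of_divisor v (d + 2) (by omega) (by linarith) h' hPr
    simp only [Bool.and_eq_true, Bool.not_eq_true', Bool.or_eq_false_iff, beq_eq_false_iff_ne,
      ne_eq, PySem.Int.mod_eq_zero_iff_dvd]
    exact ⟨⟨h3, h5⟩, hInner⟩

lemma aLoop_spec (v : Int) : 7 ≤ v → v % 2 = 1 →
    Pr (aLoop v) ∧ v ≤ aLoop v ∧ ∀ q, v ≤ q → q < aLoop v → ¬ Pr q := by
  induction v using aLoop.induct with
  | case1 v h1 ih =>
      intro h7 hodd
      rw [aLoop, dif_pos h1]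
      obtain ⟨hp, hge, hmin⟩ := ih (by omega) (by omega)
      refine ⟨hp, by omega, ?_⟩
      intro q hq1 hq2
      by_cases hq : q = v
      · rw [hq]
        simp only [Bool.or_eq_true, beq_iff_eq, PySem.Int.mod_eq_zero_iff_dvd] at h1
        rcases h1 with h' | h'
        · exact not_prime_of_divisor v 3 (by norm_num) (by omega) h'
        · exact not_prime_of_divisor v 5 (by norm_num) (by omega) h'
      · by_cases hq' : q = v + 1
        · rw [hq']
          exact even_not_Pr (v + 1) (by omega) (by omega)
        · exact hmin q (by omega) hq2
  | case2 v h1 h2 =>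
      intro h7 hodd
      rw [aLoop, dif_neg h1, dif_pos h2]
      refine ⟨?_, le_rfl, ?_⟩
      · apply (stopA_iff v h7 hodd).mp
        have h1' : ¬ (3:Int) ∣ v ∧ ¬ (5:Int) ∣ v := by simpa using h1
        simp [stopA, h2]
        exact h1'
      · intro q hq1 hq2
        omega
  | case3 v h1 h2 ih =>
      intro h7 hodd
      rw [aLoop, dif_neg h1, dif_neg h2]
      obtain ⟨hp, hge, hmin⟩ := ih (by omega) (by omega)
      refine ⟨hp, by omega, ?_⟩
      intro q hq1 hq2
      by_cases hq : q = v
      · rw [hq]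
        have h2' : aInner v 5 = false := by simpa using h2
        obtain ⟨d, hd5, hdd, hddvd⟩ := aInner_false_sound v 5 h2' (by norm_num)
        have hmul : 5 * d ≤ d * d := by nlinarith
        rcases hddvd with h' | h'
        · exact not_prime_of_divisor v d (by omega) (by linarith) h'
        · exact not_prime_of_divisor v (d + 2) (by omega) (by linarith) h'
      · by_cases hq' : q = v + 1
        · rw [hq']
          exact even_not_Pr (v + 1) (by omega) (by omega)
        · exact hmin q (by omega) hq2

lemma least_unique (s w1 w2 : Int)
    (h1 : Pr w1 ∧ s ≤ w1 ∧ ∀ q, s ≤ q → q < w1 → ¬ Pr q)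
    (h2 : Pr w2 ∧ s ≤ w2 ∧ ∀ q, s ≤ q → q < w2 → ¬ Pr q) : w1 = w2 := by
  rcases h1 with ⟨p1, ge1, min1⟩
  rcases h2 with ⟨p2, ge2, min2⟩
  rcases lt_trichotomy w1 w2 with h | h | h
  · exact absurd p1 (min2 w1 ge1 h)
  · exact h
  · exact absurd p2 (min1 w2 ge2 h)

-- ===== VERDICT (by name: the statement is the Claim_ definition above) =====
theorem find_greater_prime_spec : Claim_equal_find_greater_prime := by
  intro val _
  unfold Spec_find_greater_prime find_greater_prime find_greater_prime_alt
  by_cases h5 : val < 5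
  · rw [if_pos h5]
    by_cases h2 : val < 2
    · rw [if_pos h2, (by omega : max (val + 1) 2 = 2)]
      exact least_unique 2 2 (outer 2)
        ⟨by unfold Pr; decide, le_rfl, fun q hq1 hq2 => absurd hq1 (by omega)⟩
        (outer_spec 2 (by norm_num))
    · rw [if_neg h2]
      interval_cases val
      · -- val = 2
        norm_num
        exact least_unique 3 3 (outer 3)
          ⟨by unfold Pr; decide, le_rfl, fun q hq1 hq2 => absurd hq1 (by omega)⟩
          (outer_spec 3 (by norm_num))
      · -- val = 3
        norm_num
        refine least_unique 4 5 (outer 4)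
          ⟨by unfold Pr; decide, by norm_num, ?_⟩ (outer_spec 4 (by norm_num))
        intro q hq1 hq2
        have : q = 4 := by omega
        subst this
        unfold Pr
        decide
      · -- val = 4
        norm_num
        exact least_unique 5 5 (outer 5)
          ⟨by unfold Pr; decide, le_rfl, fun q hq1 hq2 => absurd hq1 (by omega)⟩
          (outer_spec 5 (by norm_num))
  · rw [if_neg h5, (by omega : max (val + 1) 2 = val + 1)]
    have hB := outer_spec (val + 1) (by omega)
    rcases Int.emod_two_eq val with he | ho
    · rw [if_neg (by simp [he])]
      exact least_unique (val + 1) _ _ (aLoop_spec (val + 1) (by omega) (by omega)) hB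
    · rw [if_pos (by simp [ho])]
      obtain ⟨hp, hge, hmin⟩ := aLoop_spec (val + 2) (by omega) (by omega)
      refine least_unique (val + 1) _ _ ⟨hp, by omega, ?_⟩ hB
      intro q hq1 hq2
      by_cases hq : q = val + 1
      · rw [hq]
        exact even_not_Pr (val + 1) (by omega) (by omega)
      · exact hmin q (by omega) hq2
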